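-- pv_equiv track=rewrite | github.com/flocto/CTFDump | 2024/FlareON/serpentine/solve_lifted/solve_lifted_old.py | split_part
-- ===== SOURCE A (Python) =====
-- def split_part(part):
--     out = []
--     chunk = []
--     for line in part.split('\n'):
--         if line.startswith('==='):
--             if chunk:
--                 out.append(chunk)
--                 chunk = []
--             # out.append([line])
--         else:
--             chunk.append(line)
--     if chunk:
--         out.append(chunk)
--     return out
-- ===== SOURCE B (Python) =====
-- def split_part(part):
--     def is_delim(line):
--         return line.startswith('===')
--
--     def chunks(lines):
--         if not lines:
--             return []
--         if is_delim(lines[0]):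
--             return chunks(lines[1:])
--         cur, rest = [lines[0]], lines[1:]
--         while rest and not is_delim(rest[0]):
--             cur.append(rest[0])
--             rest = rest[1:]
--         return [cur] + chunks(rest)
--
--     return chunks(part.split('\n'))
-- ===== Notes on version B (the rewrite author's own statement) =====
-- stated objective: alternative
-- what changed: Replaces A's single fold with a mutable chunk accumulator and end-of-loop flush by a recursive takeWhile/dropWhile decomposition: skip a delimiter line, otherwise emit the maximal run of non-delimiter lines and recurse on the rest; no pending-chunk state or final flush exists.
import Mathlib
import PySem

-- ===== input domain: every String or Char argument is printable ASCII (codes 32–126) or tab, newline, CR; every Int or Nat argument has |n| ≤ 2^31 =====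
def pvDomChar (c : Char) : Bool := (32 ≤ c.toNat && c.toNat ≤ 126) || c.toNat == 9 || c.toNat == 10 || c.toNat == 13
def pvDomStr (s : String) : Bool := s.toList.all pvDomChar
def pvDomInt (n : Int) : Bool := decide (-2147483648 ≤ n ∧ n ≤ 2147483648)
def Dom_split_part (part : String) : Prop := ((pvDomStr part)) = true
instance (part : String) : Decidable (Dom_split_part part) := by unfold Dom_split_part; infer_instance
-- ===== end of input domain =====

-- B rewrites A's fold with a pending-chunk accumulator and final flush as a recursive
-- take-run/drop-run decomposition (objective: alternative, same linear cost).

-- ===== PORT A =====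
-- one loop step of A: state = (out, chunk)
def splitPartStepA (st : List (List String) × List String) (line : String) :
    List (List String) × List String :=
  if PySem.Str.startswith line "===" then
    if st.2 ≠ [] then (st.1 ++ [st.2], []) else st
  else
    (st.1, st.2 ++ [line])

def split_part (part : String) : List (List String) :=
  -- part.split('\n'): sep is non-empty, so PySem.Str.split? always returns some
  let st := ((PySem.Str.split? part "\n").getD []).foldl splitPartStepA ([], [])
  if st.2 ≠ [] then st.1 ++ [st.2] else st.1

-- ===== PORT B =====
def pvIsDelim (line : String) : Bool := PySem.Str.startswith line "==="

-- Source B's chunks: skip a leading delimiter, else emit the maximal non-delimiter run and recurse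
def pvChunksB : List String → List (List String)
  | [] => []
  | l :: ls =>
    if pvIsDelim l then pvChunksB ls
    else
      (l :: ls.takeWhile (fun x => !pvIsDelim x)) ::
        pvChunksB (ls.dropWhile (fun x => !pvIsDelim x))
termination_by ls => ls.length
decreasing_by
  · simp
  · have := List.length_dropWhile_le (p := fun x => !pvIsDelim x) (l := ls)
    simp only [List.length_cons]; omega

def split_part_alt (part : String) : List (List String) :=
  pvChunksB ((PySem.Str.split? part "\n").getD [])

-- ===== PRECONDITION & SPEC =====
def Spec_split_part (part : String) (out : List (List String)) : Prop := out = split_part_alt part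
instance (part : String) (out : List (List String)) : Decidable (Spec_split_part part out) := by unfold Spec_split_part; infer_instance

-- ===== CLAIM (what is proved, stated in full; the proofs are below) =====
def Claim_equal_split_part : Prop := ∀ (part : String), Dom_split_part part → Spec_split_part part (split_part part)

-- ===== LEMMAS AND PROOFS =====

-- A's final flush of a state
def pvFin (st : List (List String) × List String) : List (List String) :=
  if st.2 ≠ [] then st.1 ++ [st.2] else st.1

-- the accumulated `out` only ever gets appended to, so it factors out of A's loop
theorem pvFoldA_out (lines : List String) (out : List (List String)) (c : List String) :
    pvFin (lines.foldl splitPartStepA (out, c)) =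
      out ++ pvFin (lines.foldl splitPartStepA ([], c)) := by
  induction lines generalizing out c with
  | nil =>
    by_cases hc : c = [] <;> simp [pvFin, hc]
  | cons l ls ih =>
    cases hd : PySem.Str.startswith l "===" with
    | true =>
      by_cases hc : c = []
      · simp only [List.foldl_cons, splitPartStepA, hd, hc, ne_eq,
          not_true_eq_false, if_neg, not_false_eq_true]
        exact ih out []
      · simp only [List.foldl_cons, splitPartStepA, hd, hc, ne_eq,
          not_false_eq_true, if_pos]
        rw [ih (out ++ [c]) [], ih ([] ++ [c]) []]
        simp
    | false =>
      simp only [List.foldl_cons, splitPartStepA, hd, Bool.false_eq_true, if_false]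
      exact ih out (c ++ [l])

-- starting from pending chunk c, A produces c glued onto the current run, then B's chunks of the rest
theorem pvFoldA_eq_chunks (lines : List String) (c : List String) :
    pvFin (lines.foldl splitPartStepA ([], c)) =
      (if c = [] then pvChunksB lines
       else (c ++ lines.takeWhile (fun x => !pvIsDelim x)) ::
              pvChunksB (lines.dropWhile (fun x => !pvIsDelim x))) := by
  induction lines generalizing c with
  | nil =>
    by_cases hc : c = [] <;> simp [pvFin, hc, pvChunksB]
  | cons l ls ih =>
    cases hd : pvIsDelim l with
    | true =>
      have hd' : PySem.Str.startswith l "===" = true := hd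
      by_cases hc : c = []
      · subst hc
        simp only [List.foldl_cons, splitPartStepA, hd', ne_eq, not_true_eq_false,
          not_false_eq_true, if_true, if_neg]
        rw [ih [], if_pos rfl]
        simp [pvChunksB, hd]
      · simp only [List.foldl_cons, splitPartStepA, hd', hc, ne_eq,
          not_false_eq_true, if_pos]
        rw [pvFoldA_out, ih [], if_pos rfl]
        simp [hd, pvChunksB]
    | false =>
      have hd' : PySem.Str.startswith l "===" = false := hd
      simp only [List.foldl_cons, splitPartStepA, hd', Bool.false_eq_true, if_false]
      rw [ih (c ++ [l]), if_neg (by simp)]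
      by_cases hc : c = []
      · rw [if_pos hc, hc]
        simp [pvChunksB, hd]
      · rw [if_neg hc]
        simp [List.takeWhile, List.dropWhile, hd]

-- ===== VERDICT (by name: the statement is the Claim_ definition above) =====
theorem split_part_spec : Claim_equal_split_part := by
  intro part _
  unfold Spec_split_part split_part split_part_alt
  have h := pvFoldA_eq_chunks ((PySem.Str.split? part "\n").getD []) []
  rw [if_pos rfl] at h
  exact h
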